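-- pv_equiv track=rewrite | github.com/futurediffusion/nuclear-sand-box | tools/validate_bandit_stress_log.py | score_cycle
-- ===== SOURCE A (Python) =====
-- STAGE_EVENTS = [
--     ("detect", {"resource_acquired", "drop_detected"}),
--     ("mine", {"resource_hit"}),
--     ("pickup", {"drop_pickup_success"}),
--     ("return", {"return_home_triggered"}),
--     ("deposit", {"deposit_success", "deposit_closed", "deposit_closed_ack"}),
-- ]
--
-- def score_cycle(events):
--     idx = 0
--     for evt in events:
--         if idx >= len(STAGE_EVENTS):
--             break
--         _, allowed = STAGE_EVENTS[idx]
--         if evt in allowed: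
--             idx += 1
--     return idx == len(STAGE_EVENTS)
-- ===== SOURCE B (Python) =====
-- STAGE_EVENTS = [
--     ("detect", {"resource_acquired", "drop_detected"}),
--     ("mine", {"resource_hit"}),
--     ("pickup", {"drop_pickup_success"}),
--     ("return", {"return_home_triggered"}),
--     ("deposit", {"deposit_success", "deposit_closed", "deposit_closed_ack"}),
-- ]
--
-- def score_cycle(events):
--     # The stage sets are pairwise disjoint, so an event can only ever advance
--     # the one stage it belongs to.  Project the event stream onto stage numbers
--     # via a precomputed event->stage dictionary, then demand that the stage
--     # numbers 0..4 occur in order, found by successive index searches.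
--     stage_of = {evt: i for i, (_, allowed) in enumerate(STAGE_EVENTS) for evt in allowed}
--     codes = [stage_of[e] for e in events if e in stage_of]
--     pos = 0
--     for stage in range(len(STAGE_EVENTS)):
--         try:
--             pos = codes.index(stage, pos) + 1
--         except ValueError:
--             return False
--     return True
-- ===== Notes on version B (the rewrite author's own statement) =====
-- stated objective: alternative
-- what changed: B drops A's per-event stage pointer entirely: it precomputes an event->stage dictionary (valid because the stage sets are pairwise disjoint), projects the event stream onto a list of stage numbers, and then verifies the cycle by successive list.index searches for stages 0..4 with a moving start offset.
import Mathlib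
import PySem

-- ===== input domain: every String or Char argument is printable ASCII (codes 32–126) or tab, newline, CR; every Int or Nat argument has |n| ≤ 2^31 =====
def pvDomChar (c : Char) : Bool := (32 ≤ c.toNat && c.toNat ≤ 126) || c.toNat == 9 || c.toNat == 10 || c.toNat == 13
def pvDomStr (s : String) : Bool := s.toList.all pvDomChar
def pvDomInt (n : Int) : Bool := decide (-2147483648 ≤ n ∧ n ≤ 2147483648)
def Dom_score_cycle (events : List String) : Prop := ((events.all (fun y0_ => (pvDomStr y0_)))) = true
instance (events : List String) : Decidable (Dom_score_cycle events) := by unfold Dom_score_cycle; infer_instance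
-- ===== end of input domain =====

-- B replaces A's stage-pointer scan with an event->stage dictionary projection followed by
-- ordered index searches for the stage numbers 0..4 (alternative decomposition, same O(n) cost).

-- ===== PORT A =====
-- A: fold over events keeping the stage index idx, guard idx >= len, index STAGE_EVENTS[idx].
def stageEvents : List (String × PySem.Set String) :=
  [("detect", PySem.Set.ofList ["resource_acquired", "drop_detected"]),
   ("mine", PySem.Set.ofList ["resource_hit"]),
   ("pickup", PySem.Set.ofList ["drop_pickup_success"]),
   ("return", PySem.Set.ofList ["return_home_triggered"]),
   ("deposit", PySem.Set.ofList ["deposit_success", "deposit_closed", "deposit_closed_ack"])]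

-- the loop body; once idx >= len the remaining iterations are no-ops, which models Python's break
def score_cycle_step (idx : Nat) (evt : String) : Nat :=
  if idx ≥ stageEvents.length then idx
  else
    let allowed := (stageEvents.getD idx ("", PySem.Set.empty)).2
    if PySem.Set.contains allowed evt then idx + 1 else idx

def score_cycle (events : List String) : Bool :=
  (events.foldl score_cycle_step 0) == stageEvents.length

-- ===== PORT B =====
-- B: the {evt: i for i, (_, allowed) in enumerate(STAGE_EVENTS) for evt in allowed} dictionary
-- (keys listed in the set-literal insertion order; all keys are distinct, so get? is the same
-- for any iteration order of those sets)
def stageOfDict : PySem.Dict String Nat :=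
  PySem.Dict.ofList
    [("resource_acquired", 0), ("drop_detected", 0),
     ("resource_hit", 1),
     ("drop_pickup_success", 2),
     ("return_home_triggered", 3),
     ("deposit_success", 4), ("deposit_closed", 4), ("deposit_closed_ack", 4)]

-- codes.index(stage, pos): search the suffix from pos and re-offset by pos (exact for 0 ≤ pos;
-- none = the ValueError caught by B's try/except)
def indexFrom (codes : List Nat) (target : Nat) (pos : Nat) : Option Nat :=
  (PySem.List.index? (codes.drop pos) target).map (pos + ·)

-- the 'for stage in range(len(STAGE_EVENTS))' loop with accumulator pos
def altLoop (codes : List Nat) : List Nat → Nat → Bool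
  | [], _ => true
  | stage :: stages, pos =>
      match indexFrom codes stage pos with
      | none => false
      | some i => altLoop codes stages (i + 1)

def score_cycle_alt (events : List String) : Bool :=
  let codes := events.filterMap (fun e => PySem.Dict.get? stageOfDict e)
  altLoop codes (List.range stageEvents.length) 0

-- ===== PRECONDITION & SPEC =====
def Spec_score_cycle (events : List String) (out : Bool) : Prop := out = score_cycle_alt events
instance (events : List String) (out : Bool) : Decidable (Spec_score_cycle events out) := by unfold Spec_score_cycle; infer_instance

-- ===== CLAIM (what is proved, stated in full; the proofs are below) =====
def Claim_equal_score_cycle : Prop := ∀ (events : List String), Dom_score_cycle events → Spec_score_cycle events (score_cycle events)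

-- ===== LEMMAS AND PROOFS =====

lemma stageOfDict_mk : stageOfDict = PySem.Dict.mk
    [("resource_acquired", 0), ("drop_detected", 0),
     ("resource_hit", 1),
     ("drop_pickup_success", 2),
     ("return_home_triggered", 3),
     ("deposit_success", 4), ("deposit_closed", 4), ("deposit_closed_ack", 4)] := by decide

-- the dictionary lookup written out as a decision chain on the event string
lemma get?_stageOfDict (e : String) : stageOfDict.get? e =
    (if "resource_acquired" = e then some 0 else if "drop_detected" = e then some 0
     else if "resource_hit" = e then some 1 else if "drop_pickup_success" = e then some 2
     else if "return_home_triggered" = e then some 3 else if "deposit_success" = e then some 4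
     else if "deposit_closed" = e then some 4 else if "deposit_closed_ack" = e then some 4
     else none) := by
  rw [stageOfDict_mk]
  simp only [PySem.Dict.get?_mk_cons, beq_iff_eq]
  rw [show (PySem.Dict.mk ([] : List (String × Nat))).get? e = none from rfl]

-- A's step depends on an event only through its stage number (the stage sets are disjoint)
set_option maxHeartbeats 1000000 in
lemma step_eq_step2 (idx : Nat) (e : String) :
    score_cycle_step idx e =
      match PySem.Dict.get? stageOfDict e with
      | none => idx
      | some c => if idx < 5 ∧ c = idx then idx + 1 else idx := by
  rw [get?_stageOfDict]
  unfold score_cycle_step stageEvents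
  by_cases h : idx ≥ 5
  · rw [if_pos (by simpa using h)]
    split_ifs <;> simp_all
  · push_neg at h
    interval_cases idx <;>
      simp only [List.length_cons, List.length_nil, List.getD, List.getElem?_cons_zero,
        List.getElem?_cons_succ, Option.getD_some, PySem.Set.contains_eq_listContains,
        List.contains_cons, PySem.Set.ofList, PySem.Set.empty] <;>
      norm_num <;> split_ifs <;> subst_vars <;> simp_all [eq_comm]

def step2 (idx : Nat) (c : Nat) : Nat := if idx < 5 ∧ c = idx then idx + 1 else idx

lemma foldA_eq_foldCodes (events : List String) : ∀ (idx : Nat),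
    events.foldl score_cycle_step idx =
      (events.filterMap (fun e => PySem.Dict.get? stageOfDict e)).foldl step2 idx := by
  induction events with
  | nil => intro idx; rfl
  | cons e rest ih =>
      intro idx
      simp only [List.foldl_cons, List.filterMap_cons, step_eq_step2 idx e]
      cases h : PySem.Dict.get? stageOfDict e with
      | none => simpa using ih idx
      | some c => simpa [step2] using ih (step2 idx c)

-- suffix recursion form of B's loop
def simpleLoop : List Nat → List Nat → Bool
  | _, [] => true
  | l, stage :: stages =>
      match PySem.List.index? l stage with
      | none => false
      | some i => simpleLoop (l.drop (i + 1)) stages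

lemma altLoop_eq_simpleLoop (stages : List Nat) : ∀ (codes : List Nat) (pos : Nat),
    altLoop codes stages pos = simpleLoop (codes.drop pos) stages := by
  induction stages with
  | nil => intro codes pos; rfl
  | cons s stages ih =>
      intro codes pos
      have h1 : altLoop codes (s :: stages) pos =
          (match indexFrom codes s pos with
           | none => false
           | some i => altLoop codes stages (i + 1)) := rfl
      have h2 : simpleLoop (codes.drop pos) (s :: stages) =
          (match PySem.List.index? (codes.drop pos) s with
           | none => false
           | some i => simpleLoop ((codes.drop pos).drop (i + 1)) stages) := rfl
      rw [h1, h2]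
      cases h : PySem.List.index? (codes.drop pos) s with
      | none =>
          rw [show indexFrom codes s pos = none from by unfold indexFrom; rw [h]; rfl]
      | some i =>
          rw [show indexFrom codes s pos = some (pos + i) from by unfold indexFrom; rw [h]; rfl]
          show altLoop codes stages (pos + i + 1) =
            simpleLoop ((codes.drop pos).drop (i + 1)) stages
          rw [ih codes (pos + i + 1), List.drop_drop]
          congr 2

lemma foldl_step2_five (l : List Nat) : l.foldl step2 5 = 5 := by
  induction l with
  | nil => rfl
  | cons c l ih => simpa [step2] using ih

lemma fold_eq_simpleLoop (l : List Nat) : ∀ (idx : Nat), idx ≤ 5 →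
    ((l.foldl step2 idx) == 5) = simpleLoop l (List.range' idx (5 - idx)) := by
  induction l with
  | nil =>
      intro idx h
      match idx, h with
      | 0, _ => decide
      | 1, _ => decide
      | 2, _ => decide
      | 3, _ => decide
      | 4, _ => decide
      | 5, _ => decide
  | cons c l ih =>
      intro idx h
      by_cases h5 : idx = 5
      · subst h5
        simp only [List.foldl_cons, show step2 5 c = 5 from by simp [step2], foldl_step2_five l]
        rfl
      · have hlt : idx < 5 := by omega
        have hr : List.range' idx (5 - idx) = idx :: List.range' (idx + 1) (5 - (idx + 1)) := by
          rw [show 5 - idx = (5 - (idx + 1)) + 1 by omega, List.range'_succ]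
        rw [hr]
        have hs : ∀ (m : List Nat), simpleLoop m (idx :: List.range' (idx + 1) (5 - (idx + 1))) =
            (match PySem.List.index? m idx with
             | none => false
             | some i => simpleLoop (m.drop (i + 1)) (List.range' (idx + 1) (5 - (idx + 1)))) :=
          fun m => rfl
        by_cases hc : c = idx
        · subst hc
          rw [List.foldl_cons, show step2 c c = c + 1 from by simp [step2, hlt]]
          rw [hs (c :: l), PySem.List.index?_cons_self]
          exact ih (c + 1) (by omega)
        · rw [List.foldl_cons, show step2 idx c = idx from by simp [step2, hc]]
          have hidx := PySem.List.index?_cons_of_ne (x := c) (v := idx) l hc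
          have this0 := ih idx h
          rw [hr, hs l] at this0
          rw [hs (c :: l), hidx]
          cases h2 : PySem.List.index? l idx with
          | none =>
              rw [h2] at this0
              exact this0
          | some i =>
              rw [h2] at this0
              exact this0

-- ===== VERDICT (by name: the statement is the Claim_ definition above) =====
theorem score_cycle_spec : Claim_equal_score_cycle := by
  intro events _
  unfold Spec_score_cycle score_cycle score_cycle_alt
  rw [foldA_eq_foldCodes events 0, altLoop_eq_simpleLoop]
  simp only [List.drop_zero]
  rw [show (List.range stageEvents.length) = List.range' 0 (5 - 0) from by decide]
  exact fold_eq_simpleLoop _ 0 (by omega)
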